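-- pv_equiv track=rewrite | github.com/sguevaraidarraga/AGRA | 2025-1/Tarea 3/forest.py | bfsAux
-- ===== SOURCE A (Python) =====
-- from collections import deque
--
-- directions = [(-1, 0), (1, 0), (0, -1), (0, 1)]
--
-- def bfsAux(g, vis, x, y):
-- 	ans = g[x][y][1]
-- 	q = deque()
-- 	vis[x][y] = True
-- 	q.append((x, y))
-- 	while len(q) > 0:
-- 		cx, cy = q.popleft()
-- 		for dx, dy in directions:
-- 			nx, ny = cx + dx, cy + dy
-- 			if 0 <= nx < len(g) and 0 <= ny < len(g[0]) and not vis[nx][ny] and g[nx][ny][0] == g[cx][cy][0]: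
-- 				vis[nx][ny] = True
-- 				q.append((nx, ny))
-- 				ans = max(ans, g[nx][ny][1])
-- 	return ans
-- ===== SOURCE B (Python) =====
-- directions = [(-1, 0), (1, 0), (0, -1), (0, 1)]
--
-- def _dfs(g, vis, cx, cy):
-- 	best = g[cx][cy][1]
-- 	for dx, dy in directions:
-- 		nx, ny = cx + dx, cy + dy
-- 		if 0 <= nx < len(g) and 0 <= ny < len(g[0]) and not vis[nx][ny] and g[nx][ny][0] == g[cx][cy][0]:
-- 			vis[nx][ny] = True
-- 			best = max(best, _dfs(g, vis, nx, ny))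
-- 	return best
--
-- def bfsAux(g, vis, x, y):
-- 	vis[x][y] = True
-- 	return _dfs(g, vis, x, y)
-- ===== Notes on version B (the rewrite author's own statement) =====
-- stated objective: alternative
-- what changed: Replaced the deque-driven BFS over the same-type region by a recursive DFS flood fill: the call stack drives the traversal and no queue is maintained; Pre_ additionally excludes ragged/undersized shapes on which A can raise IndexError (some of which A happens to survive; B agrees there).
-- outside the precondition, e.g. on bfsAux([[(0, 1), (1, 5)], [(0, 2)]], [[False, False], [False, True]], 0, 0): A returns 2, B returns 2
import Mathlib
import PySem

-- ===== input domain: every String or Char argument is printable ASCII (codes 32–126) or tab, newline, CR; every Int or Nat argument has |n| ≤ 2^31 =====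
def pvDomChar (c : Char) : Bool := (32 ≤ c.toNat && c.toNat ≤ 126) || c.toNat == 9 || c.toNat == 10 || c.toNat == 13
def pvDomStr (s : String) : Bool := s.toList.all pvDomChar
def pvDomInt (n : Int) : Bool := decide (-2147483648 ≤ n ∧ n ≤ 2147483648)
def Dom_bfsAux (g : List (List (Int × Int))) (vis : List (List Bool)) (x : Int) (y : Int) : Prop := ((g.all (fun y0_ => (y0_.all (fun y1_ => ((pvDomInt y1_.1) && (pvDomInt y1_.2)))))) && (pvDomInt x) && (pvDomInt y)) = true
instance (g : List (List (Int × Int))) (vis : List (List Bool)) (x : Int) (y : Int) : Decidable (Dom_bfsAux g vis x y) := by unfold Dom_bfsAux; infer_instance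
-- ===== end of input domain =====

-- B replaces A's deque-driven BFS by a recursive DFS flood fill (no queue; the call stack
-- drives the traversal); same asymptotic cost.  Both Pythons mutate `vis` in place in the
-- same way; the equivalence proved here is about the return value.

-- shared primitives: Python 2-D subscript m[i][j] and assignment vis[i][j] = True,
-- exact including negative-index wraparound (via PySem pyGet?/pySetD)
def pvGet2 {α : Type} (m : List (List α)) (i j : Int) : Option α :=
  (PySem.List.pyGet? m i).bind (fun r => PySem.List.pyGet? r j)

def pvSet2 (vis : List (List Bool)) (i j : Int) : List (List Bool) :=
  PySem.List.pySetD vis i (PySem.List.pySetD (PySem.List.pyGetD vis i []) j true)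

def pvVal (g : List (List (Int × Int))) (i j : Int) : Int := ((pvGet2 g i j).getD (0, 0)).2

def pvDirections : List (Int × Int) := [(-1, 0), (1, 0), (0, -1), (0, 1)]

-- the guard `0 <= nx < len(g) and 0 <= ny < len(g[0]) and not vis[nx][ny] and g[nx][ny][0] == g[cx][cy][0]`
-- (an out-of-range lookup, where Python would raise, makes the guard false; Pre_ excludes those inputs)
def pvCond (g : List (List (Int × Int))) (vis : List (List Bool)) (cx cy nx ny : Int) : Bool :=
  (decide (0 ≤ nx ∧ nx < (g.length : Int) ∧ 0 ≤ ny ∧ ny < ((g.headD []).length : Int)))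
  && (pvGet2 vis nx ny == some false)
  && (match pvGet2 g nx ny, pvGet2 g cx cy with
      | some a, some b => a.1 == b.1
      | _, _ => false)

-- number of unvisited cells; used only to compute a sufficient fuel (totality guard)
def countFalse (vis : List (List Bool)) : Nat := (vis.map (fun r => r.count false)).sum

-- ===== PORT A =====  (deque BFS: pop from the front, append marked neighbours at the back)
def bfsStep (g : List (List (Int × Int))) (cx cy : Int)
    (s : List (List Bool) × List (Int × Int) × Int) (d : Int × Int) :
    List (List Bool) × List (Int × Int) × Int :=
  let nx := cx + d.1
  let ny := cy + d.2
  if pvCond g s.1 cx cy nx ny then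
    (pvSet2 s.1 nx ny, s.2.1 ++ [(nx, ny)], max s.2.2 (pvVal g nx ny))
  else s

def bfsLoop (g : List (List (Int × Int))) : Nat → List (List Bool) → List (Int × Int) → Int → Int
  | 0, _, _, ans => ans
  | _ + 1, _, [], ans => ans
  | f + 1, vis, c :: rest, ans =>
    let s := pvDirections.foldl (bfsStep g c.1 c.2) (vis, rest, ans)
    bfsLoop g f s.1 s.2.1 s.2.2

def bfsAux (g : List (List (Int × Int))) (vis : List (List Bool)) (x : Int) (y : Int) : Int :=
  let ans := pvVal g x y
  let vis1 := pvSet2 vis x y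
  bfsLoop g (countFalse vis1 + 1) vis1 [(x, y)] ans

-- ===== PORT B =====  (recursive DFS flood fill; fuel is only a totality guard)
mutual
def dfsGo (g : List (List (Int × Int))) (f : Nat) (vis : List (List Bool)) (cx cy : Int) :
    List (List Bool) × Int :=
  match f with
  | 0 => (vis, 0)
  | f' + 1 => dfsDirs g f' vis cx cy (pvVal g cx cy) pvDirections
termination_by (f, 0)

def dfsDirs (g : List (List (Int × Int))) (f : Nat) (vis : List (List Bool)) (cx cy best : Int)
    (ds : List (Int × Int)) : List (List Bool) × Int :=
  match ds with
  | [] => (vis, best)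
  | d :: ds' =>
    let nx := cx + d.1
    let ny := cy + d.2
    if pvCond g vis cx cy nx ny then
      let r := dfsGo g f (pvSet2 vis nx ny) nx ny
      dfsDirs g f r.1 cx cy (max best r.2) ds'
    else
      dfsDirs g f vis cx cy best ds'
termination_by (f, ds.length + 1)
end

def bfsAux_alt (g : List (List (Int × Int))) (vis : List (List Bool)) (x : Int) (y : Int) : Int :=
  let vis1 := pvSet2 vis x y
  (dfsGo g (countFalse vis1 + 1) vis1 x y).2

-- ===== PRECONDITION & SPEC =====
-- Pre_ excludes the inputs where A raises IndexError (empty grid, seed index out of range,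
-- vis shorter than g, a row shorter than row 0) and, with them, ragged shapes that A only
-- sometimes survives (B agrees with A there; see the cited example).
def Pre_bfsAux (g : List (List (Int × Int))) (vis : List (List Bool)) (x : Int) (y : Int) : Prop :=
  0 < g.length ∧
  (∀ r ∈ g, (g.headD []).length ≤ r.length) ∧
  g.length ≤ vis.length ∧
  (∀ r ∈ vis, (g.headD []).length ≤ r.length) ∧
  -(g.length : Int) ≤ x ∧ x < (g.length : Int) ∧
  -((g.headD []).length : Int) ≤ y ∧ y < ((g.headD []).length : Int)

instance (g : List (List (Int × Int))) (vis : List (List Bool)) (x : Int) (y : Int) : Decidable (Pre_bfsAux g vis x y) := by unfold Pre_bfsAux; infer_instance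

def pvWitness_bfsAux : (List (List (Int × Int))) × List (List Bool) × Int × Int :=
  ([[(0, 1)]], [[false]], 0, 0)

def Spec_bfsAux (g : List (List (Int × Int))) (vis : List (List Bool)) (x : Int) (y : Int) (out : Int) : Prop := out = bfsAux_alt g vis x y
instance (g : List (List (Int × Int))) (vis : List (List Bool)) (x : Int) (y : Int) (out : Int) : Decidable (Spec_bfsAux g vis x y out) := by unfold Spec_bfsAux; infer_instance

-- ===== CLAIM (what is proved, stated in full; the proofs are below) =====
def Claim_equal_bfsAux : Prop := ∀ (g : List (List (Int × Int))) (vis : List (List Bool)) (x : Int) (y : Int), Dom_bfsAux g vis x y → Pre_bfsAux g vis x y → Spec_bfsAux g vis x y (bfsAux g vis x y)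

-- ===== LEMMAS AND PROOFS =====

-- abstractions for the proof: cell lookup states, monotone growth of vis, shapes, one
-- eligible step of the flood fill, reachability from the seed, "all successors marked"
def Tru (vis : List (List Bool)) (p : Int × Int) : Prop := pvGet2 vis p.1 p.2 = some true
def Fls (vis : List (List Bool)) (p : Int × Int) : Prop := pvGet2 vis p.1 p.2 = some false
def Mono (u v : List (List Bool)) : Prop :=
  ∀ p : Int × Int, (Tru u p → Tru v p) ∧ (Fls v p → Fls u p)
def Shp (g : List (List (Int × Int))) (vis : List (List Bool)) : Prop :=
  g.length ≤ vis.length ∧ ∀ r ∈ vis, (g.headD []).length ≤ r.length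
def InB (g : List (List (Int × Int))) (p : Int × Int) : Prop :=
  0 ≤ p.1 ∧ p.1 < (g.length : Int) ∧ 0 ≤ p.2 ∧ p.2 < ((g.headD []).length : Int)
def EStep (g : List (List (Int × Int))) (w : List (List Bool)) (p q : Int × Int) : Prop :=
  (∃ d ∈ pvDirections, q = (p.1 + d.1, p.2 + d.2)) ∧ InB g q ∧ Fls w q ∧
  (∃ a b : Int × Int, pvGet2 g q.1 q.2 = some a ∧ pvGet2 g p.1 p.2 = some b ∧ a.1 = b.1)
inductive Reach (g : List (List (Int × Int))) (w : List (List Bool)) (s : Int × Int) :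
    Int × Int → Prop
  | base : Reach g w s s
  | step {p q : Int × Int} : Reach g w s p → EStep g w p q → Reach g w s q
def Procd (g : List (List (Int × Int))) (w vis : List (List Bool)) (p : Int × Int) : Prop :=
  ∀ q, EStep g w p q → Tru vis q

-- ---- low-level index/set lemmas ----
theorem optBindSome {α β : Type} (a : α) (f : α → Option β) : (some a).bind f = f a := rfl

theorem pyIdx_lt {n : Nat} {i : Int} {k : Nat} (h : PySem.List.pyIdx? n i = some k) : k < n := by
  unfold PySem.List.pyIdx? at h
  split_ifs at h with h1 h2 h3 <;>
    first
      | (rw [Option.some.injEq] at h; omega)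
      | exact absurd h (by simp)

theorem pyGet_of_idx {α : Type} (xs : List α) {i : Int} {k : Nat}
    (h : PySem.List.pyIdx? xs.length i = some k) : PySem.List.pyGet? xs i = xs[k]? := by
  unfold PySem.List.pyGet?; rw [h]; rfl

theorem pyIdx_some_of_range {n : Nat} {i : Int} (h1 : -(n : Int) ≤ i) (h2 : i < n) :
    ∃ k, PySem.List.pyIdx? n i = some k ∧ k < n := by
  unfold PySem.List.pyIdx?
  split_ifs with h3 h4 h5 <;>
    first
      | exact ⟨i.toNat, rfl, by omega⟩
      | exact ⟨n - (-i).toNat, rfl, by omega⟩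
      | omega

theorem pyIdx_nonneg_eq {n : Nat} {i : Int} {k : Nat} (hi : 0 ≤ i)
    (h : PySem.List.pyIdx? n i = some k) : k = i.toNat ∧ i < (n : Int) := by
  unfold PySem.List.pyIdx? at h
  split_ifs at h with h1 h2 h3 <;> simp_all <;> omega

theorem set2_cases (vis : List (List Bool)) (i j : Int) :
    (PySem.List.pyIdx? vis.length i = none ∧ pvSet2 vis i j = vis) ∨
    ∃ (k : Nat) (rowk : List Bool), PySem.List.pyIdx? vis.length i = some k ∧ k < vis.length ∧
      vis[k]? = some rowk ∧
      pvSet2 vis i j = vis.set k (PySem.List.pySetD rowk j true) := by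
  rcases hk : PySem.List.pyIdx? vis.length i with _ | k
  · left
    refine ⟨rfl, ?_⟩
    unfold pvSet2 PySem.List.pySetD PySem.List.pySet?
    rw [hk]; rfl
  · right
    have hklt : k < vis.length := pyIdx_lt hk
    have hget : vis[k]? = some vis[k] := List.getElem?_eq_getElem hklt
    refine ⟨k, vis[k], rfl, hklt, hget, ?_⟩
    have hrowk : PySem.List.pyGetD vis i [] = vis[k] := by
      unfold PySem.List.pyGetD
      rw [pyGet_of_idx vis hk, hget]; rfl
    conv_lhs => rw [pvSet2, hrowk]
    unfold PySem.List.pySetD PySem.List.pySet?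
    rw [hk]; rfl

theorem rowset_cases (row : List Bool) (j : Int) :
    (PySem.List.pyIdx? row.length j = none ∧ PySem.List.pySetD row j true = row) ∨
    ∃ m : Nat, PySem.List.pyIdx? row.length j = some m ∧ m < row.length ∧
      PySem.List.pySetD row j true = row.set m true := by
  rcases hm : PySem.List.pyIdx? row.length j with _ | m
  · exact Or.inl ⟨rfl, by unfold PySem.List.pySetD PySem.List.pySet?; rw [hm]; rfl⟩
  · right
    exact ⟨m, rfl, pyIdx_lt hm, by unfold PySem.List.pySetD PySem.List.pySet?; rw [hm]; rfl⟩

theorem get2_decomp {α : Type} (m : List (List α)) (p q : Int) :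
    pvGet2 m p q =
      (PySem.List.pyIdx? m.length p).bind
        (fun k => m[k]?.bind (fun row => PySem.List.pyGet? row q)) := by
  unfold pvGet2 PySem.List.pyGet?
  rcases PySem.List.pyIdx? m.length p with _ | k <;> rfl

theorem pyGet_set_decomp {α : Type} (m : List α) (k : Nat) (v : α) (q : Int) :
    PySem.List.pyGet? (m.set k v) q = (PySem.List.pyIdx? m.length q).bind (fun x => (m.set k v)[x]?) := by
  unfold PySem.List.pyGet?
  rw [List.length_set]

theorem get2_set2 (vis : List (List Bool)) (i j p q : Int) :
    pvGet2 (pvSet2 vis i j) p q = pvGet2 vis p q ∨ pvGet2 (pvSet2 vis i j) p q = some true := by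
  rcases set2_cases vis i j with ⟨_, h⟩ | ⟨k, rowk, hk, hklt, hrowk, h⟩
  · rw [h]; left; rfl
  · rw [h, get2_decomp, get2_decomp, List.length_set]
    rcases hp : PySem.List.pyIdx? vis.length p with _ | m
    · left; rfl
    · simp only [optBindSome]
      by_cases hmk : m = k
      · subst hmk
        rw [List.getElem?_set_self hklt, hrowk]
        simp only [optBindSome]
        rcases rowset_cases rowk j with ⟨_, h2⟩ | ⟨m2, hm2, hlt2, h2⟩
        · rw [h2]; left; rfl
        · rw [h2, pyGet_set_decomp]
          rw [show PySem.List.pyGet? rowk q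
                = (PySem.List.pyIdx? rowk.length q).bind (fun x => rowk[x]?) from rfl]
          rcases hq2 : PySem.List.pyIdx? rowk.length q with _ | m3
          · left; rfl
          · simp only [optBindSome]
            by_cases hm32 : m3 = m2
            · subst hm32
              rw [List.getElem?_set_self hlt2]; right; rfl
            · rw [List.getElem?_set_ne (fun hh => hm32 hh.symm)]; left; rfl
      · rw [List.getElem?_set_ne (fun hh => hmk hh.symm)]; left; rfl

theorem get2_set2_self {vis : List (List Bool)} {i j : Int} {b : Bool}
    (h : pvGet2 vis i j = some b) : pvGet2 (pvSet2 vis i j) i j = some true := by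
  rw [get2_decomp] at h
  rcases Option.bind_eq_some_iff.1 h with ⟨k, hk, h2⟩
  rcases Option.bind_eq_some_iff.1 h2 with ⟨rowk, hrowk, h3⟩
  have h4 := h3
  rw [PySem.List.pyGet?] at h4
  rcases Option.bind_eq_some_iff.1 h4 with ⟨m, hm, h5⟩
  have hmlt : m < rowk.length := pyIdx_lt hm
  have hklt : k < vis.length := pyIdx_lt hk
  rcases set2_cases vis i j with ⟨hnone, _⟩ | ⟨k', rowk', hk', hklt', hrowk', hcase⟩
  · rw [hnone] at hk; exact absurd hk (by simp)
  · rw [hk] at hk'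
    injection hk' with hkk
    subst hkk
    rw [hrowk] at hrowk'
    injection hrowk' with hrr
    subst hrr
    rcases rowset_cases rowk j with ⟨hnone2, _⟩ | ⟨m2, hm2, hlt2, h6⟩
    · rw [hnone2] at hm; exact absurd hm (by simp)
    · rw [hm] at hm2
      injection hm2 with hmm
      subst hmm
      rw [hcase, h6, get2_decomp, List.length_set, hk]
      simp only [optBindSome]
      rw [List.getElem?_set_self hklt]
      simp only [optBindSome]
      rw [pyGet_set_decomp, hm]
      simp only [optBindSome]
      rw [List.getElem?_set_self hlt2]

theorem get2_set2_canon {vis : List (List Bool)} {i j p q : Int}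
    (hi : 0 ≤ i) (hj : 0 ≤ j) (hp : 0 ≤ p) (hq : 0 ≤ q) (hne : ¬(p = i ∧ q = j)) :
    pvGet2 (pvSet2 vis i j) p q = pvGet2 vis p q := by
  rcases set2_cases vis i j with ⟨_, h⟩ | ⟨k, rowk, hk, hklt, hrowk, h⟩
  · rw [h]
  · obtain ⟨hkk, hilt⟩ := pyIdx_nonneg_eq hi hk
    rw [h, get2_decomp, get2_decomp, List.length_set]
    rcases hpidx : PySem.List.pyIdx? vis.length p with _ | m
    · rfl
    · obtain ⟨hmm, hplt⟩ := pyIdx_nonneg_eq hp hpidx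
      simp only [optBindSome]
      by_cases hpi : p = i
      · have hmk : m = k := by omega
        rw [hmk, List.getElem?_set_self hklt, hrowk]
        simp only [optBindSome]
        rcases rowset_cases rowk j with ⟨_, h2⟩ | ⟨m2, hm2, hlt2, h2⟩
        · rw [h2]
        · obtain ⟨hm2e, hjlt⟩ := pyIdx_nonneg_eq hj hm2
          rw [h2, pyGet_set_decomp,
            show PySem.List.pyGet? rowk q
              = (PySem.List.pyIdx? rowk.length q).bind (fun x => rowk[x]?) from rfl]
          rcases hq2 : PySem.List.pyIdx? rowk.length q with _ | m3
          · rfl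
          · obtain ⟨hm3e, hqlt⟩ := pyIdx_nonneg_eq hq hq2
            simp only [optBindSome]
            have hqj : q ≠ j := fun hh => hne ⟨hpi, hh⟩
            have hne2 : m3 ≠ m2 := by omega
            rw [List.getElem?_set_ne (fun hh => hne2 hh.symm)]
      · have hne2 : m ≠ k := by omega
        rw [List.getElem?_set_ne (fun hh => hne2 hh.symm)]

theorem mono_set2 (vis : List (List Bool)) (i j : Int) : Mono vis (pvSet2 vis i j) := by
  intro p
  constructor
  · intro h
    unfold Tru at *
    rcases get2_set2 vis i j p.1 p.2 with he | ht
    · rw [he]; exact h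
    · exact ht
  · intro h
    unfold Fls at *
    rcases get2_set2 vis i j p.1 p.2 with he | ht
    · rw [he] at h; exact h
    · rw [ht] at h; exact absurd h (by simp)

theorem mono_refl (vis : List (List Bool)) : Mono vis vis := fun _ => ⟨id, id⟩

theorem mono_trans {u v w : List (List Bool)} (h1 : Mono u v) (h2 : Mono v w) : Mono u w :=
  fun p => ⟨fun h => (h2 p).1 ((h1 p).1 h), fun h => (h1 p).2 ((h2 p).2 h)⟩

theorem procd_mono {g : List (List (Int × Int))} {w u v : List (List Bool)} {p : Int × Int}
    (h : Mono u v) (hp : Procd g w u p) : Procd g w v p :=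
  fun q hq => (h q).1 (hp q hq)

theorem count_set_true_lt : ∀ (row : List Bool) (m : Nat), row[m]? = some false →
    (row.set m true).count false < row.count false := by
  intro row
  induction row with
  | nil => intro m h; simp at h
  | cons a t ih =>
    intro m h
    cases m with
    | zero =>
      simp at h
      subst h
      simp [List.count_cons]
    | succ m =>
      simp only [List.set, List.count_cons]
      have := ih m (by simpa using h)
      omega

theorem cf_cons (r : List Bool) (v : List (List Bool)) :
    countFalse (r :: v) = r.count false + countFalse v := by
  simp [countFalse]

theorem cf_set_lt : ∀ (vis : List (List Bool)) (k : Nat) (r' r : List Bool),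
    vis[k]? = some r → r'.count false < r.count false →
    countFalse (vis.set k r') < countFalse vis := by
  intro vis
  induction vis with
  | nil => intro k r' r h _; simp at h
  | cons a t ih =>
    intro k r' r h hlt
    cases k with
    | zero =>
      simp at h
      subst h
      simp only [List.set, cf_cons]
      omega
    | succ k =>
      simp only [List.set, cf_cons]
      have := ih k r' r (by simpa using h) hlt
      omega

theorem mem_set_cases {α : Type} : ∀ (l : List α) (k : Nat) (v r : α), r ∈ l.set k v → r ∈ l ∨ r = v := by
  intro l
  induction l with
  | nil => intro k v r h; simp [List.set] at h
  | cons a t ih =>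
    intro k v r h
    cases k with
    | zero =>
      rcases List.mem_cons.1 h with h1 | h1
      · right; exact h1
      · left; exact List.mem_cons_of_mem _ h1
    | succ k =>
      rcases List.mem_cons.1 h with h1 | h1
      · left; exact h1 ▸ List.mem_cons_self
      · rcases ih k v r h1 with h2 | h2
        · left; exact List.mem_cons_of_mem _ h2
        · right; exact h2

theorem countFalse_set2_lt {vis : List (List Bool)} {i j : Int} (h : Fls vis (i, j)) :
    countFalse (pvSet2 vis i j) < countFalse vis := by
  unfold Fls at h
  rw [get2_decomp] at h
  rcases Option.bind_eq_some_iff.1 h with ⟨k0, hk0, h2⟩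
  rcases Option.bind_eq_some_iff.1 h2 with ⟨rowk0, hrowk0, h3⟩
  rw [show PySem.List.pyGet? rowk0 (i, j).2
        = (PySem.List.pyIdx? rowk0.length (i, j).2).bind (fun x => rowk0[x]?) from rfl] at h3
  rcases Option.bind_eq_some_iff.1 h3 with ⟨m0, hm0, h4⟩
  rcases set2_cases vis i j with ⟨hnone, _⟩ | ⟨k, rowk, hk, hklt, hrowk, hcase⟩
  · rw [hnone] at hk0; exact absurd hk0 (by simp)
  · rw [hk0] at hk
    injection hk with hk
    subst hk
    rw [hrowk0] at hrowk
    injection hrowk with hrowk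
    subst hrowk
    rcases rowset_cases rowk0 j with ⟨hnone2, _⟩ | ⟨m2, hm2, hlt2, h6⟩
    · rw [hnone2] at hm0; exact absurd hm0 (by simp)
    · rw [hm0] at hm2
      injection hm2 with hm2
      subst hm2
      rw [hcase, h6]
      exact cf_set_lt vis k0 _ rowk0 hrowk0 (count_set_true_lt rowk0 m0 h4)

theorem shp_set2 {g : List (List (Int × Int))} {vis : List (List Bool)} (hs : Shp g vis)
    (i j : Int) : Shp g (pvSet2 vis i j) := by
  rcases set2_cases vis i j with ⟨_, h⟩ | ⟨k, rowk, hk, hklt, hrowk, h⟩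
  · rw [h]; exact hs
  · rw [h]
    constructor
    · rw [List.length_set]; exact hs.1
    · intro r hr
      rcases mem_set_cases _ _ _ _ hr with h1 | h1
      · exact hs.2 r h1
      · subst h1
        have hmem : rowk ∈ vis := by
          have := List.getElem?_eq_getElem hklt
          rw [this] at hrowk
          injection hrowk with hrowk
          exact hrowk ▸ List.getElem_mem hklt
        have hC := hs.2 rowk hmem
        rcases rowset_cases rowk j with ⟨_, h2⟩ | ⟨m2, hm2, hlt2, h2⟩
        · rw [h2]; exact hC
        · rw [h2, List.length_set]; exact hC

theorem shp_some {g : List (List (Int × Int))} {vis : List (List Bool)} {p : Int × Int}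
    (hs : Shp g vis) (hb : InB g p) : ∃ b, pvGet2 vis p.1 p.2 = some b := by
  obtain ⟨hl, hr⟩ := hs
  obtain ⟨h1, h2, h3, h4⟩ := hb
  obtain ⟨k, hk, hklt⟩ := pyIdx_some_of_range (n := vis.length) (i := p.1) (by omega) (by omega)
  have hrow := List.getElem?_eq_getElem hklt
  have hmem : vis[k] ∈ vis := List.getElem_mem hklt
  have hC := hr _ hmem
  obtain ⟨m, hm, hmlt⟩ := pyIdx_some_of_range (n := vis[k].length) (i := p.2) (by omega) (by omega)
  refine ⟨vis[k][m], ?_⟩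
  rw [get2_decomp, hk, optBindSome, hrow, optBindSome, pyGet_of_idx _ hm,
    List.getElem?_eq_getElem hmlt]

theorem pre_get2_some {g : List (List (Int × Int))} {vis : List (List Bool)} {x y : Int}
    (hp : Pre_bfsAux g vis x y) : ∃ b, pvGet2 vis x y = some b := by
  obtain ⟨hg0, hrows, hvl, hvr, hx1, hx2, hy1, hy2⟩ := hp
  obtain ⟨k, hk, hklt⟩ := pyIdx_some_of_range (n := vis.length) (i := x) (by omega) (by omega)
  have hrow := List.getElem?_eq_getElem hklt
  have hmem : vis[k] ∈ vis := List.getElem_mem hklt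
  have hC := hvr _ hmem
  obtain ⟨m, hm, hmlt⟩ := pyIdx_some_of_range (n := vis[k].length) (i := y) (by omega) (by omega)
  refine ⟨vis[k][m], ?_⟩
  rw [get2_decomp, hk, optBindSome, hrow, optBindSome, pyGet_of_idx _ hm,
    List.getElem?_eq_getElem hmlt]

theorem cond_iff (g : List (List (Int × Int))) (vis : List (List Bool)) (cx cy nx ny : Int) :
    pvCond g vis cx cy nx ny = true ↔
      InB g (nx, ny) ∧ Fls vis (nx, ny) ∧
      (∃ a b : Int × Int, pvGet2 g nx ny = some a ∧ pvGet2 g cx cy = some b ∧ a.1 = b.1) := by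
  unfold pvCond
  constructor
  · intro h
    simp only [Bool.and_eq_true, decide_eq_true_eq, beq_iff_eq] at h
    obtain ⟨⟨hb, hv⟩, hm⟩ := h
    refine ⟨⟨hb.1, hb.2.1, hb.2.2.1, hb.2.2.2⟩, hv, ?_⟩
    rcases ha : pvGet2 g nx ny with _ | a <;> rcases hbb : pvGet2 g cx cy with _ | b <;>
      rw [ha, hbb] at hm <;> simp at hm
    exact ⟨a, b, rfl, rfl, hm⟩
  · rintro ⟨⟨h1, h2, h3, h4⟩, h5, a, b, ha, hb, heq⟩
    simp only [Bool.and_eq_true, decide_eq_true_eq, beq_iff_eq]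
    refine ⟨⟨⟨h1, h2, h3, h4⟩, h5⟩, ?_⟩
    rw [ha, hb]
    simp [heq]

-- A popped cell whose guard fails on an eligible neighbour must already see it marked
theorem covered_of_cond_false {g : List (List (Int × Int))} {w vis : List (List Bool)}
    {c qc : Int × Int} {d : Int × Int}
    (hs : Shp g vis) (hm : Mono w vis)
    (hE : EStep g w c qc) (hq : qc = (c.1 + d.1, c.2 + d.2))
    (hc : pvCond g vis c.1 c.2 (c.1 + d.1) (c.2 + d.2) = false) : Tru vis qc := by
  obtain ⟨_, hIn, _, a, b, ha, hb, heq⟩ := hE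
  subst hq
  rcases shp_some hs hIn with ⟨bb, hbb⟩
  cases bb with
  | true => exact hbb
  | false =>
    have ht : pvCond g vis c.1 c.2 (c.1 + d.1) (c.2 + d.2) = true :=
      (cond_iff g vis c.1 c.2 (c.1 + d.1) (c.2 + d.2)).2 ⟨hIn, hbb, a, b, ha, hb, heq⟩
    rw [hc] at ht
    exact absurd ht (by simp)

theorem estep_of_cond {g : List (List (Int × Int))} {w vis : List (List Bool)} {c : Int × Int}
    {d : Int × Int} (hd : d ∈ pvDirections) (hm : Mono w vis)
    (hc : pvCond g vis c.1 c.2 (c.1 + d.1) (c.2 + d.2) = true) :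
    EStep g w c (c.1 + d.1, c.2 + d.2) := by
  obtain ⟨hIn, hFl, a, b, ha, hb, heq⟩ := (cond_iff g vis c.1 c.2 (c.1 + d.1) (c.2 + d.2)).1 hc
  exact ⟨⟨d, hd, rfl⟩, hIn, (hm _).2 hFl, a, b, ha, hb, heq⟩

-- ---- A side ----
def bfsLoopV (g : List (List (Int × Int))) :
    Nat → List (List Bool) → List (Int × Int) → Int → List (List Bool) × Int
  | 0, vis, _, ans => (vis, ans)
  | _ + 1, vis, [], ans => (vis, ans)
  | f + 1, vis, c :: rest, ans =>
    let s := pvDirections.foldl (bfsStep g c.1 c.2) (vis, rest, ans)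
    bfsLoopV g f s.1 s.2.1 s.2.2

theorem bfsLoop_eq_loopV (g : List (List (Int × Int))) :
    ∀ (f : Nat) (vis : List (List Bool)) (q : List (Int × Int)) (ans : Int),
      bfsLoop g f vis q ans = (bfsLoopV g f vis q ans).2 := by
  intro f
  induction f with
  | zero => intro vis q ans; rfl
  | succ f ih =>
    intro vis q ans
    cases q with
    | nil => rfl
    | cons c rest =>
      simp only [bfsLoop, bfsLoopV]
      exact ih _ _ _

theorem bfsStep_true {g : List (List (Int × Int))} {cx cy : Int} {vis : List (List Bool)}
    {q : List (Int × Int)} {ans : Int} {d : Int × Int}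
    (h : pvCond g vis cx cy (cx + d.1) (cy + d.2) = true) :
    bfsStep g cx cy (vis, q, ans) d =
      (pvSet2 vis (cx + d.1) (cy + d.2), q ++ [(cx + d.1, cy + d.2)],
        max ans (pvVal g (cx + d.1) (cy + d.2))) := by
  unfold bfsStep
  simp [h]

theorem bfsStep_false {g : List (List (Int × Int))} {cx cy : Int} {vis : List (List Bool)}
    {q : List (Int × Int)} {ans : Int} {d : Int × Int}
    (h : pvCond g vis cx cy (cx + d.1) (cy + d.2) = false) :
    bfsStep g cx cy (vis, q, ans) d = (vis, q, ans) := by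
  unfold bfsStep
  simp [h]

theorem foldA_sound (g : List (List (Int × Int))) (w : List (List Bool)) (sd c : Int × Int)
    (M : Int) :
    ∀ (ds : List (Int × Int)) (vis : List (List Bool)) (q : List (Int × Int)) (ans : Int),
      (∀ d ∈ ds, d ∈ pvDirections) → Mono w vis → Reach g w sd c →
      (∀ p, Reach g w sd p → pvVal g p.1 p.2 ≤ M) → ans ≤ M →
      (∀ p ∈ q, Reach g w sd p) →
      Mono w (ds.foldl (bfsStep g c.1 c.2) (vis, q, ans)).1 ∧
      (∀ p ∈ (ds.foldl (bfsStep g c.1 c.2) (vis, q, ans)).2.1, Reach g w sd p) ∧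
      (ds.foldl (bfsStep g c.1 c.2) (vis, q, ans)).2.2 ≤ M := by
  intro ds
  induction ds with
  | nil => intro vis q ans _ hm _ _ hans hq; exact ⟨hm, hq, hans⟩
  | cons d ds ih =>
    intro vis q ans hds hm hreach hM hans hq
    rw [List.foldl_cons]
    by_cases hc : pvCond g vis c.1 c.2 (c.1 + d.1) (c.2 + d.2) = true
    · rw [bfsStep_true hc]
      have hd : d ∈ pvDirections := hds d List.mem_cons_self
      have hE := estep_of_cond hd hm hc
      have hreach2 : Reach g w sd (c.1 + d.1, c.2 + d.2) := Reach.step hreach hE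
      apply ih
      · exact fun d' hd' => hds d' (List.mem_cons_of_mem _ hd')
      · exact mono_trans hm (mono_set2 _ _ _)
      · exact hreach
      · exact hM
      · exact max_le hans (hM _ hreach2)
      · intro p hp
        rcases List.mem_append.1 hp with h1 | h1
        · exact hq p h1
        · rw [List.mem_singleton.1 h1]; exact hreach2
    · rw [bfsStep_false (Bool.eq_false_iff.2 hc)]
      exact ih vis q ans (fun d' hd' => hds d' (List.mem_cons_of_mem _ hd')) hm hreach hM hans hq

theorem loopA_sound (g : List (List (Int × Int))) (w : List (List Bool)) (sd : Int × Int)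
    (M : Int) :
    ∀ (f : Nat) (vis : List (List Bool)) (q : List (Int × Int)) (ans : Int),
      Mono w vis → (∀ p ∈ q, Reach g w sd p) →
      (∀ p, Reach g w sd p → pvVal g p.1 p.2 ≤ M) → ans ≤ M →
      bfsLoop g f vis q ans ≤ M := by
  intro f
  induction f with
  | zero => intro vis q ans _ _ _ hans; exact hans
  | succ f ih =>
    intro vis q ans hm hq hM hans
    cases q with
    | nil => exact hans
    | cons c rest =>
      have hF := foldA_sound g w sd c M pvDirections vis rest ans (fun d hd => hd) hm
        (hq c List.mem_cons_self) hM hans (fun p hp => hq p (List.mem_cons_of_mem _ hp))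
      simp only [bfsLoop]
      exact ih _ _ _ hF.1 hF.2.1 hM hF.2.2

theorem foldA_complete (g : List (List (Int × Int))) (w : List (List Bool)) (c : Int × Int) :
    ∀ (ds : List (Int × Int)) (vis : List (List Bool)) (q : List (Int × Int)) (ans : Int)
      (res : List (List Bool) × List (Int × Int) × Int),
      res = ds.foldl (bfsStep g c.1 c.2) (vis, q, ans) → Shp g vis → Mono w vis →
      Shp g res.1 ∧ Mono w res.1 ∧ Mono vis res.1 ∧ ans ≤ res.2.2 ∧
      countFalse res.1 + res.2.1.length ≤ countFalse vis + q.length ∧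
      (∀ p ∈ q, p ∈ res.2.1) ∧
      (∀ p ∈ res.2.1, p ∈ q ∨ Tru res.1 p) ∧
      (∀ p : Int × Int, 0 ≤ p.1 → 0 ≤ p.2 → Tru res.1 p →
        Tru vis p ∨ (p ∈ res.2.1 ∧ Fls vis p ∧ pvVal g p.1 p.2 ≤ res.2.2)) ∧
      (∀ d ∈ ds, ∀ qc : Int × Int, EStep g w c qc → qc = (c.1 + d.1, c.2 + d.2) →
        Tru res.1 qc) := by
  intro ds
  induction ds with
  | nil =>
    intro vis q ans res hres hs hm
    subst hres
    refine ⟨hs, hm, mono_refl vis, le_refl ans, le_refl _, fun p hp => hp,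
      fun p hp => Or.inl hp, fun p _ _ hT => Or.inl hT, fun d hd => absurd hd (by simp)⟩
  | cons d ds ih =>
    intro vis q ans res hres hs hm
    rw [List.foldl_cons] at hres
    by_cases hc : pvCond g vis c.1 c.2 (c.1 + d.1) (c.2 + d.2) = true
    · rw [bfsStep_true hc] at hres
      obtain ⟨hIn, hFls, _⟩ := (cond_iff g vis c.1 c.2 (c.1 + d.1) (c.2 + d.2)).1 hc
      have hms : Mono vis (pvSet2 vis (c.1 + d.1) (c.2 + d.2)) := mono_set2 _ _ _
      have hTq : Tru (pvSet2 vis (c.1 + d.1) (c.2 + d.2)) (c.1 + d.1, c.2 + d.2) :=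
        get2_set2_self hFls
      obtain ⟨hS1, hS2, hS3, hS4, hS5, hS6, hS7, hS8, hS9⟩ :=
        ih (pvSet2 vis (c.1 + d.1) (c.2 + d.2)) (q ++ [(c.1 + d.1, c.2 + d.2)])
          (max ans (pvVal g (c.1 + d.1) (c.2 + d.2))) res hres
          (shp_set2 hs _ _) (mono_trans hm hms)
      have hcnt : countFalse (pvSet2 vis (c.1 + d.1) (c.2 + d.2)) < countFalse vis :=
        countFalse_set2_lt hFls
      refine ⟨hS1, hS2, mono_trans hms hS3, le_trans (le_max_left _ _) hS4, ?_, ?_, ?_, ?_, ?_⟩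
      · have hla : (q ++ [(c.1 + d.1, c.2 + d.2)]).length = q.length + 1 := by simp
        rw [hla] at hS5
        omega
      · intro p hp
        exact hS6 p (List.mem_append_left _ hp)
      · intro p hp
        rcases hS7 p hp with h1 | h1
        · rcases List.mem_append.1 h1 with h2 | h2
          · exact Or.inl h2
          · right
            rw [List.mem_singleton.1 h2]
            exact (hS3 _).1 hTq
        · exact Or.inr h1
      · intro p hp1 hp2 hT
        rcases hS8 p hp1 hp2 hT with h1 | ⟨h1, h2, h3⟩
        · by_cases hpqc : p = (c.1 + d.1, c.2 + d.2)
          · right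
            refine ⟨hS6 _ (List.mem_append_right _ (List.mem_singleton.2 hpqc)), ?_, ?_⟩
            · rw [hpqc]; exact hFls
            · rw [hpqc]
              exact le_trans (le_max_right _ _) hS4
          · left
            unfold Tru at h1 ⊢
            rw [get2_set2_canon hIn.1 hIn.2.2.1 hp1 hp2
              (fun hh => hpqc (Prod.ext_iff.2 hh))] at h1
            exact h1
        · exact Or.inr ⟨h1, (hms p).2 h2, h3⟩
      · intro d0 hd0 qc hE hqe
        rcases List.mem_cons.1 hd0 with h1 | h1
        · subst h1
          rw [hqe]
          exact (hS3 _).1 hTq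
        · exact hS9 d0 h1 qc hE hqe
    · rw [bfsStep_false (Bool.eq_false_iff.2 hc)] at hres
      obtain ⟨hS1, hS2, hS3, hS4, hS5, hS6, hS7, hS8, hS9⟩ := ih vis q ans res hres hs hm
      refine ⟨hS1, hS2, hS3, hS4, hS5, hS6, hS7, hS8, ?_⟩
      intro d0 hd0 qc hE hqe
      rcases List.mem_cons.1 hd0 with h1 | h1
      · subst h1
        exact (hS3 _).1 (covered_of_cond_false hs hm hE hqe (Bool.eq_false_iff.2 hc))
      · exact hS9 d0 h1 qc hE hqe

theorem loopA_complete (g : List (List (Int × Int))) (w : List (List Bool)) (sd : Int × Int)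
    (hw : Tru w sd) :
    ∀ (f : Nat) (vis : List (List Bool)) (q : List (Int × Int)) (ans : Int),
      countFalse vis + q.length ≤ f → Shp g vis → Mono w vis →
      (∀ p ∈ q, Tru vis p) →
      (∀ p : Int × Int, ((0 ≤ p.1 ∧ 0 ≤ p.2 ∧ Fls w p) ∨ p = sd) → Tru vis p →
        p ∈ q ∨ Procd g w vis p) →
      (∀ p : Int × Int, 0 ≤ p.1 → 0 ≤ p.2 → Tru vis p → Fls w p → pvVal g p.1 p.2 ≤ ans) →
      Mono vis (bfsLoopV g f vis q ans).1 ∧ Mono w (bfsLoopV g f vis q ans).1 ∧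
      ans ≤ (bfsLoopV g f vis q ans).2 ∧
      (∀ p : Int × Int, ((0 ≤ p.1 ∧ 0 ≤ p.2 ∧ Fls w p) ∨ p = sd) →
        Tru (bfsLoopV g f vis q ans).1 p → Procd g w (bfsLoopV g f vis q ans).1 p) ∧
      (∀ p : Int × Int, 0 ≤ p.1 → 0 ≤ p.2 → Tru (bfsLoopV g f vis q ans).1 p → Fls w p →
        pvVal g p.1 p.2 ≤ (bfsLoopV g f vis q ans).2) := by
  intro f
  induction f with
  | zero =>
    intro vis q ans hcount hs hm hqT hqinv hval
    have hq : q = [] := List.length_eq_zero_iff.1 (by omega)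
    subst hq
    refine ⟨mono_refl vis, hm, le_refl ans, ?_, hval⟩
    intro p hp hT
    rcases hqinv p hp hT with h1 | h1
    · exact absurd h1 (by simp)
    · exact h1
  | succ f ih =>
    intro vis q ans hcount hs hm hqT hqinv hval
    cases q with
    | nil =>
      refine ⟨mono_refl vis, hm, le_refl ans, ?_, hval⟩
      intro p hp hT
      rcases hqinv p hp hT with h1 | h1
      · exact absurd h1 (by simp)
      · exact h1
    | cons c rest =>
      obtain ⟨hS1, hS2, hS3, hS4, hS5, hS6, hS7, hS8, hS9⟩ :=
        foldA_complete g w c pvDirections vis rest ans _ rfl hs hm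
      set F := pvDirections.foldl (bfsStep g c.1 c.2) (vis, rest, ans) with hFdef
      have hcount' : countFalse F.1 + F.2.1.length ≤ f := by
        have hlc : (c :: rest).length = rest.length + 1 := rfl
        rw [hlc] at hcount
        omega
      have hqT' : ∀ p ∈ F.2.1, Tru F.1 p := by
        intro p hp
        rcases hS7 p hp with h1 | h1
        · exact (hS3 p).1 (hqT p (List.mem_cons_of_mem _ h1))
        · exact h1
      have hqinv' : ∀ p : Int × Int, ((0 ≤ p.1 ∧ 0 ≤ p.2 ∧ Fls w p) ∨ p = sd) → Tru F.1 p →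
          p ∈ F.2.1 ∨ Procd g w F.1 p := by
        intro p htag hT
        by_cases hTv : Tru vis p
        · rcases hqinv p htag hTv with h1 | h1
          · rcases List.mem_cons.1 h1 with h2 | h2
            · subst h2
              right
              intro qc hE
              obtain ⟨d, hd, hqe⟩ := hE.1
              exact hS9 d hd qc hE hqe
            · exact Or.inl (hS6 p h2)
          · exact Or.inr (procd_mono hS3 h1)
        · rcases htag with ⟨hp1, hp2, _⟩ | hsd
          · rcases hS8 p hp1 hp2 hT with h1 | ⟨h1, _, _⟩
            · exact absurd h1 hTv
            · exact Or.inl h1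
          · subst hsd
            exact absurd ((hm p).1 hw) hTv
      have hval' : ∀ p : Int × Int, 0 ≤ p.1 → 0 ≤ p.2 → Tru F.1 p → Fls w p →
          pvVal g p.1 p.2 ≤ F.2.2 := by
        intro p hp1 hp2 hT hFw
        by_cases hTv : Tru vis p
        · exact le_trans (hval p hp1 hp2 hTv hFw) hS4
        · rcases hS8 p hp1 hp2 hT with h1 | ⟨_, _, h3⟩
          · exact absurd h1 hTv
          · exact h3
      obtain ⟨hR1, hR2, hR3, hR4, hR5⟩ := ih F.1 F.2.1 F.2.2 hcount' hS1 hS2 hqT' hqinv' hval'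
      have hred : bfsLoopV g (f + 1) vis (c :: rest) ans = bfsLoopV g f F.1 F.2.1 F.2.2 := by
        rw [hFdef]
        rfl
      rw [hred]
      exact ⟨mono_trans hS3 hR1, hR2, le_trans hS4 hR3, hR4, hR5⟩

-- ---- B side ----
theorem dfsDirs_nil (g : List (List (Int × Int))) (f : Nat) (vis : List (List Bool))
    (cx cy best : Int) : dfsDirs g f vis cx cy best [] = (vis, best) := by
  rw [dfsDirs.eq_def]

theorem dfsDirs_cons_true {g : List (List (Int × Int))} {f : Nat} {vis : List (List Bool)}
    {cx cy best : Int} {d : Int × Int} {ds : List (Int × Int)}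
    (h : pvCond g vis cx cy (cx + d.1) (cy + d.2) = true) :
    dfsDirs g f vis cx cy best (d :: ds) =
      dfsDirs g f (dfsGo g f (pvSet2 vis (cx + d.1) (cy + d.2)) (cx + d.1) (cy + d.2)).1 cx cy
        (max best (dfsGo g f (pvSet2 vis (cx + d.1) (cy + d.2)) (cx + d.1) (cy + d.2)).2) ds := by
  conv_lhs => rw [dfsDirs.eq_def]
  simp [h]

theorem dfsDirs_cons_false {g : List (List (Int × Int))} {f : Nat} {vis : List (List Bool)}
    {cx cy best : Int} {d : Int × Int} {ds : List (Int × Int)}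
    (h : pvCond g vis cx cy (cx + d.1) (cy + d.2) = false) :
    dfsDirs g f vis cx cy best (d :: ds) = dfsDirs g f vis cx cy best ds := by
  conv_lhs => rw [dfsDirs.eq_def]
  simp [h]

theorem dfsGo_succ (g : List (List (Int × Int))) (f : Nat) (vis : List (List Bool))
    (cx cy : Int) :
    dfsGo g (f + 1) vis cx cy = dfsDirs g f vis cx cy (pvVal g cx cy) pvDirections := by
  rw [dfsGo.eq_def]

theorem dirs_main (g : List (List (Int × Int))) (w : List (List Bool)) (sd : Int × Int) (f : Nat)
    (hGo : ∀ (vis : List (List Bool)) (cx cy : Int),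
      countFalse vis < f → Shp g vis → Mono w vis →
      Mono vis (dfsGo g f vis cx cy).1 ∧ Shp g (dfsGo g f vis cx cy).1 ∧
      countFalse (dfsGo g f vis cx cy).1 ≤ countFalse vis ∧
      pvVal g cx cy ≤ (dfsGo g f vis cx cy).2 ∧
      (∀ p : Int × Int, 0 ≤ p.1 → 0 ≤ p.2 → Tru (dfsGo g f vis cx cy).1 p →
        Tru vis p ∨ (Fls vis p ∧ pvVal g p.1 p.2 ≤ (dfsGo g f vis cx cy).2 ∧
          Procd g w (dfsGo g f vis cx cy).1 p)) ∧
      Procd g w (dfsGo g f vis cx cy).1 (cx, cy) ∧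
      (∀ M : Int, Reach g w sd (cx, cy) → (∀ p, Reach g w sd p → pvVal g p.1 p.2 ≤ M) →
        (dfsGo g f vis cx cy).2 ≤ M)) :
    ∀ (ds : List (Int × Int)) (vis : List (List Bool)) (cx cy best : Int),
      (∀ d ∈ ds, d ∈ pvDirections) → countFalse vis ≤ f → Shp g vis → Mono w vis →
      Mono vis (dfsDirs g f vis cx cy best ds).1 ∧ Shp g (dfsDirs g f vis cx cy best ds).1 ∧
      countFalse (dfsDirs g f vis cx cy best ds).1 ≤ countFalse vis ∧
      best ≤ (dfsDirs g f vis cx cy best ds).2 ∧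
      (∀ p : Int × Int, 0 ≤ p.1 → 0 ≤ p.2 → Tru (dfsDirs g f vis cx cy best ds).1 p →
        Tru vis p ∨ (Fls vis p ∧ pvVal g p.1 p.2 ≤ (dfsDirs g f vis cx cy best ds).2 ∧
          Procd g w (dfsDirs g f vis cx cy best ds).1 p)) ∧
      (∀ d ∈ ds, ∀ qc : Int × Int, EStep g w (cx, cy) qc → qc = (cx + d.1, cy + d.2) →
        Tru (dfsDirs g f vis cx cy best ds).1 qc) ∧
      (∀ M : Int, Reach g w sd (cx, cy) → (∀ p, Reach g w sd p → pvVal g p.1 p.2 ≤ M) →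
        best ≤ M → (dfsDirs g f vis cx cy best ds).2 ≤ M) := by
  intro ds
  induction ds with
  | nil =>
    intro vis cx cy best _ _ hs hm
    rw [dfsDirs_nil]
    exact ⟨mono_refl vis, hs, le_refl _, le_refl _, fun p _ _ hT => Or.inl hT,
      fun d hd => absurd hd (by simp), fun M _ _ hb => hb⟩
  | cons d ds ih =>
    intro vis cx cy best hds hcf hs hm
    have hd : d ∈ pvDirections := hds d List.mem_cons_self
    by_cases hc : pvCond g vis cx cy (cx + d.1) (cy + d.2) = true
    · rw [dfsDirs_cons_true hc]
      obtain ⟨hIn, hFls, _⟩ := (cond_iff g vis cx cy (cx + d.1) (cy + d.2)).1 hc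
      have hms : Mono vis (pvSet2 vis (cx + d.1) (cy + d.2)) := mono_set2 _ _ _
      have hcnt : countFalse (pvSet2 vis (cx + d.1) (cy + d.2)) < countFalse vis :=
        countFalse_set2_lt hFls
      obtain ⟨hG1, hG2, hG3, hG4, hG5, hG6, hG7⟩ :=
        hGo (pvSet2 vis (cx + d.1) (cy + d.2)) (cx + d.1) (cy + d.2) (by omega)
          (shp_set2 hs _ _) (mono_trans hm hms)
      obtain ⟨hD1, hD2, hD3, hD4, hD5, hD6, hD7⟩ :=
        ih (dfsGo g f (pvSet2 vis (cx + d.1) (cy + d.2)) (cx + d.1) (cy + d.2)).1 cx cy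
          (max best (dfsGo g f (pvSet2 vis (cx + d.1) (cy + d.2)) (cx + d.1) (cy + d.2)).2)
          (fun d' hd' => hds d' (List.mem_cons_of_mem _ hd')) (by omega) hG2
          (mono_trans (mono_trans hm hms) hG1)
      have hTq : Tru (pvSet2 vis (cx + d.1) (cy + d.2)) (cx + d.1, cy + d.2) :=
        get2_set2_self hFls
      refine ⟨mono_trans hms (mono_trans hG1 hD1), hD2, by omega,
        le_trans (le_max_left _ _) hD4, ?_, ?_, ?_⟩
      · intro p hp1 hp2 hT
        rcases hD5 p hp1 hp2 hT with h1 | ⟨h1, h2, h3⟩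
        · rcases hG5 p hp1 hp2 h1 with h4 | ⟨h4, h5, h6⟩
          · by_cases hpqc : p = (cx + d.1, cy + d.2)
            · right
              refine ⟨?_, ?_, ?_⟩
              · rw [hpqc]; exact hFls
              · rw [hpqc]
                exact le_trans hG4 (le_trans (le_max_right _ _) hD4)
              · rw [hpqc]
                exact procd_mono hD1 hG6
            · left
              unfold Tru at h4 ⊢
              rw [get2_set2_canon hIn.1 hIn.2.2.1 hp1 hp2
                (fun hh => hpqc (Prod.ext_iff.2 hh))] at h4
              exact h4
          · right
            exact ⟨(hms p).2 h4, le_trans h5 (le_trans (le_max_right _ _) hD4),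
              procd_mono hD1 h6⟩
        · right
          exact ⟨(hms p).2 ((hG1 p).2 h1), h2, h3⟩
      · intro d0 hd0 qc hE hqe
        rcases List.mem_cons.1 hd0 with h1 | h1
        · subst h1
          rw [hqe]
          exact (hD1 _).1 ((hG1 _).1 hTq)
        · exact hD6 d0 h1 qc hE hqe
      · intro M hR hM hb
        have hE : EStep g w (cx, cy) (cx + d.1, cy + d.2) := estep_of_cond (c := (cx, cy)) hd hm hc
        exact hD7 M hR hM (max_le hb (hG7 M (Reach.step hR hE) hM))
    · rw [dfsDirs_cons_false (Bool.eq_false_iff.2 hc)]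
      obtain ⟨hD1, hD2, hD3, hD4, hD5, hD6, hD7⟩ :=
        ih vis cx cy best (fun d' hd' => hds d' (List.mem_cons_of_mem _ hd')) hcf hs hm
      refine ⟨hD1, hD2, hD3, hD4, hD5, ?_, hD7⟩
      intro d0 hd0 qc hE hqe
      rcases List.mem_cons.1 hd0 with h1 | h1
      · subst h1
        exact (hD1 _).1 (covered_of_cond_false hs hm hE hqe (Bool.eq_false_iff.2 hc))
      · exact hD6 d0 h1 qc hE hqe

theorem dfs_main (g : List (List (Int × Int))) (w : List (List Bool)) (sd : Int × Int) :
    ∀ (f : Nat) (vis : List (List Bool)) (cx cy : Int),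
      countFalse vis < f → Shp g vis → Mono w vis →
      Mono vis (dfsGo g f vis cx cy).1 ∧ Shp g (dfsGo g f vis cx cy).1 ∧
      countFalse (dfsGo g f vis cx cy).1 ≤ countFalse vis ∧
      pvVal g cx cy ≤ (dfsGo g f vis cx cy).2 ∧
      (∀ p : Int × Int, 0 ≤ p.1 → 0 ≤ p.2 → Tru (dfsGo g f vis cx cy).1 p →
        Tru vis p ∨ (Fls vis p ∧ pvVal g p.1 p.2 ≤ (dfsGo g f vis cx cy).2 ∧
          Procd g w (dfsGo g f vis cx cy).1 p)) ∧
      Procd g w (dfsGo g f vis cx cy).1 (cx, cy) ∧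
      (∀ M : Int, Reach g w sd (cx, cy) → (∀ p, Reach g w sd p → pvVal g p.1 p.2 ≤ M) →
        (dfsGo g f vis cx cy).2 ≤ M) := by
  intro f
  induction f with
  | zero => intro vis cx cy hcf _ _; exact absurd hcf (Nat.not_lt_zero _)
  | succ f ih =>
    intro vis cx cy hcf hs hm
    have hD := dirs_main g w sd f ih pvDirections vis cx cy (pvVal g cx cy)
      (fun d hd => hd) (by omega) hs hm
    obtain ⟨hD1, hD2, hD3, hD4, hD5, hD6, hD7⟩ := hD
    rw [dfsGo_succ]
    refine ⟨hD1, hD2, hD3, hD4, hD5, ?_, ?_⟩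
    · intro qc hE
      obtain ⟨d, hd, hqe⟩ := hE.1
      exact hD6 d hd qc hE hqe
    · intro M hR hM
      exact hD7 M hR hM (hM _ hR)

-- ---- assembling the two inequalities ----
theorem pre_shp {g : List (List (Int × Int))} {vis : List (List Bool)} {x y : Int}
    (hp : Pre_bfsAux g vis x y) : Shp g vis :=
  ⟨hp.2.2.1, hp.2.2.2.1⟩

theorem pre_tru {g : List (List (Int × Int))} {vis : List (List Bool)} {x y : Int}
    (hp : Pre_bfsAux g vis x y) : Tru (pvSet2 vis x y) (x, y) := by
  obtain ⟨b, hb⟩ := pre_get2_some hp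
  exact get2_set2_self hb

-- the two runs, their completeness (every reachable cell's value is bounded by the result)
theorem A_complete {g : List (List (Int × Int))} {vis : List (List Bool)} {x y : Int}
    (hp : Pre_bfsAux g vis x y) :
    ∀ p : Int × Int, Reach g (pvSet2 vis x y) (x, y) p →
      pvVal g p.1 p.2 ≤ bfsAux g vis x y := by
  have hTw := pre_tru hp
  have hShpw : Shp g (pvSet2 vis x y) := shp_set2 (pre_shp hp) x y
  obtain ⟨hA1, hA2, hA3, hA4, hA5⟩ :=
    loopA_complete g (pvSet2 vis x y) (x, y) hTw (countFalse (pvSet2 vis x y) + 1)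
      (pvSet2 vis x y) [(x, y)] (pvVal g x y) (by simp) hShpw (mono_refl _)
      (fun p hp' => by rw [List.mem_singleton.1 hp']; exact hTw)
      (by
        intro p htag hT
        rcases htag with ⟨_, _, hFw⟩ | hsd
        · unfold Tru at hT
          unfold Fls at hFw
          rw [hT] at hFw
          exact absurd hFw (by simp)
        · exact Or.inl (List.mem_singleton.2 hsd))
      (by
        intro p _ _ hT hFw
        unfold Tru at hT
        unfold Fls at hFw
        rw [hT] at hFw
        exact absurd hFw (by simp))
  have hval : bfsAux g vis x y =
      (bfsLoopV g (countFalse (pvSet2 vis x y) + 1) (pvSet2 vis x y) [(x, y)]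
        (pvVal g x y)).2 := by
    unfold bfsAux
    exact bfsLoop_eq_loopV g _ _ _ _
  have hcls : ∀ p : Int × Int, Reach g (pvSet2 vis x y) (x, y) p →
      p = (x, y) ∨ (0 ≤ p.1 ∧ 0 ≤ p.2 ∧ Fls (pvSet2 vis x y) p ∧
        Tru (bfsLoopV g (countFalse (pvSet2 vis x y) + 1) (pvSet2 vis x y) [(x, y)]
          (pvVal g x y)).1 p) := by
    intro p hR
    induction hR with
    | base => exact Or.inl rfl
    | @step p' q' hR' hE ih' =>
      have hPr : Procd g (pvSet2 vis x y)
          (bfsLoopV g (countFalse (pvSet2 vis x y) + 1) (pvSet2 vis x y) [(x, y)]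
            (pvVal g x y)).1 p' := by
        rcases ih' with h1 | ⟨h1, h2, h3, h4⟩
        · subst h1
          exact hA4 _ (Or.inr rfl) ((hA2 _).1 hTw)
        · exact hA4 _ (Or.inl ⟨h1, h2, h3⟩) h4
      right
      have hE' := hE
      obtain ⟨_, hIn, hFw, _⟩ := hE
      exact ⟨hIn.1, hIn.2.2.1, hFw, hPr q' hE'⟩
  intro p hR
  rw [hval]
  rcases hcls p hR with h1 | ⟨h1, h2, _, h4⟩
  · subst h1
    exact hA3
  · rcases hcls p hR with h1' | ⟨_, _, h3', h4'⟩
    · subst h1'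
      exact hA3
    · exact hA5 p h1 h2 h4' h3'

theorem B_complete {g : List (List (Int × Int))} {vis : List (List Bool)} {x y : Int}
    (hp : Pre_bfsAux g vis x y) :
    ∀ p : Int × Int, Reach g (pvSet2 vis x y) (x, y) p →
      pvVal g p.1 p.2 ≤ bfsAux_alt g vis x y := by
  have hTw := pre_tru hp
  have hShpw : Shp g (pvSet2 vis x y) := shp_set2 (pre_shp hp) x y
  obtain ⟨hB1, hB2, hB3, hB4, hB5, hB6, hB7⟩ :=
    dfs_main g (pvSet2 vis x y) (x, y) (countFalse (pvSet2 vis x y) + 1)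
      (pvSet2 vis x y) x y (by omega) hShpw (mono_refl _)
  have hcls : ∀ p : Int × Int, Reach g (pvSet2 vis x y) (x, y) p →
      p = (x, y) ∨ (0 ≤ p.1 ∧ 0 ≤ p.2 ∧ Fls (pvSet2 vis x y) p ∧
        Tru (dfsGo g (countFalse (pvSet2 vis x y) + 1) (pvSet2 vis x y) x y).1 p) := by
    intro p hR
    induction hR with
    | base => exact Or.inl rfl
    | @step p' q' hR' hE ih' =>
      have hPr : Procd g (pvSet2 vis x y)
          (dfsGo g (countFalse (pvSet2 vis x y) + 1) (pvSet2 vis x y) x y).1 p' := by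
        rcases ih' with h1 | ⟨h1, h2, h3, h4⟩
        · subst h1
          exact hB6
        · rcases hB5 _ h1 h2 h4 with h5 | ⟨_, _, h7⟩
          · unfold Tru at h5
            unfold Fls at h3
            rw [h5] at h3
            exact absurd h3 (by simp)
          · exact h7
      right
      have hE' := hE
      obtain ⟨_, hIn, hFw, _⟩ := hE
      exact ⟨hIn.1, hIn.2.2.1, hFw, hPr q' hE'⟩
  intro p hR
  show pvVal g p.1 p.2 ≤ (dfsGo g (countFalse (pvSet2 vis x y) + 1) (pvSet2 vis x y) x y).2
  rcases hcls p hR with h1 | ⟨h1, h2, h3, h4⟩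
  · subst h1
    exact hB4
  · rcases hB5 _ h1 h2 h4 with h5 | ⟨_, h6, _⟩
    · unfold Tru at h5
      unfold Fls at h3
      rw [h5] at h3
      exact absurd h3 (by simp)
    · exact h6

theorem bfsAux_le_alt {g : List (List (Int × Int))} {vis : List (List Bool)} {x y : Int}
    (hp : Pre_bfsAux g vis x y) : bfsAux g vis x y ≤ bfsAux_alt g vis x y := by
  have hB := B_complete hp
  show bfsLoop g (countFalse (pvSet2 vis x y) + 1) (pvSet2 vis x y) [(x, y)] (pvVal g x y) ≤
    bfsAux_alt g vis x y
  apply loopA_sound g (pvSet2 vis x y) (x, y) (bfsAux_alt g vis x y) _ _ _ _ (mono_refl _)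
  · intro p hp'
    rw [List.mem_singleton.1 hp']
    exact Reach.base
  · exact hB
  · exact hB (x, y) Reach.base

theorem alt_le_bfsAux {g : List (List (Int × Int))} {vis : List (List Bool)} {x y : Int}
    (hp : Pre_bfsAux g vis x y) : bfsAux_alt g vis x y ≤ bfsAux g vis x y := by
  have hA := A_complete hp
  have hShpw : Shp g (pvSet2 vis x y) := shp_set2 (pre_shp hp) x y
  obtain ⟨_, _, _, _, _, _, hB7⟩ :=
    dfs_main g (pvSet2 vis x y) (x, y) (countFalse (pvSet2 vis x y) + 1)
      (pvSet2 vis x y) x y (by omega) hShpw (mono_refl _)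
  show (dfsGo g (countFalse (pvSet2 vis x y) + 1) (pvSet2 vis x y) x y).2 ≤ bfsAux g vis x y
  exact hB7 (bfsAux g vis x y) Reach.base hA

-- ===== VERDICT (by name: the statement is the Claim_ definition above) =====
theorem bfsAux_spec : Claim_equal_bfsAux := by
  intro g vis x y _ hp
  unfold Spec_bfsAux
  exact le_antisymm (bfsAux_le_alt hp) (alt_le_bfsAux hp)
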